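-- pv_equiv track=rewrite | github.com/EgnaldCela/PythonBasics | 3increasing.py | solution
-- ===== SOURCE A (Python) =====
-- def solution(V):
--     n = len(V)
--     for i in range(n):
--         count = 0
--         for j in range(i,n):
--             if V[j] > V[i]:
--                 count += 1
--             if count==3:
--                 return True
--     return False
-- ===== SOURCE B (Python) =====
-- def solution(V):
--     # Single right-to-left pass keeping the three largest elements of the
--     # suffix seen so far (descending); v qualifies iff the 3rd largest is > v.
--     top = []  # at most three largest elements of the processed suffix, descending
--     for v in reversed(V):
--         if len(top) == 3 and top[2] > v:
--             return True
--         i = 0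
--         while i < len(top) and top[i] >= v:
--             i += 1
--         top.insert(i, v)
--         del top[3:]
--     return False
-- ===== Notes on version B (the rewrite author's own statement) =====
-- stated objective: faster
-- what changed: Replaced A's nested quadratic scan (for each i, count larger elements to its right with early exit) by a single right-to-left pass that maintains the three largest elements of the suffix seen so far and reports True as soon as the current element is below the third-largest.
import Mathlib
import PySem

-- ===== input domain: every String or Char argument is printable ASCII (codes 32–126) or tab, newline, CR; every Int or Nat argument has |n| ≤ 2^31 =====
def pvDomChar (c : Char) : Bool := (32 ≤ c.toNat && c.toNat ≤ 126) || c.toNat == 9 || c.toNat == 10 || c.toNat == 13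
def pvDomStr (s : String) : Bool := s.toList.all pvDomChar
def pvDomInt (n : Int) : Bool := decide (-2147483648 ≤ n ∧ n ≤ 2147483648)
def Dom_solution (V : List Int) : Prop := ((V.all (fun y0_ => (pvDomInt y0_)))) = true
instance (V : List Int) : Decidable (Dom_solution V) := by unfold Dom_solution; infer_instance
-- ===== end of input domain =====

-- B replaces A's quadratic double loop by one right-to-left pass keeping the three
-- largest elements of the suffix seen so far (objective: faster).

-- ===== PORT A =====
-- inner loop: for j in range(i,n), scanning the suffix starting at i, with `count`
def innerA (vi : Int) : List Int → Int → Bool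
  | [], _ => false
  | x :: rest, count =>
    let c := if x > vi then count + 1 else count
    if c = 3 then true else innerA vi rest c

-- outer loop: for i in range(n); early return when the inner loop returns True
def outerA : List Int → Bool
  | [] => false
  | v :: rest => if innerA v (v :: rest) 0 then true else outerA rest

def solution (V : List Int) : Bool := outerA V

-- ===== PORT B =====
-- the while/insert/del step: insert v into the descending list `top` after all
-- elements ≥ v (top.insert(i, v) with i found by the while loop)
def insTop (v : Int) : List Int → List Int
  | [] => [v]
  | x :: r => if x ≥ v then x :: insTop v r else v :: x :: r

-- for v in reversed(V), with accumulator `top` (del top[3:] = take 3)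
def goB : List Int → List Int → Bool
  | _, [] => false
  | top, v :: rest =>
    if top.length == 3 && decide (PySem.List.pyGetD top 2 0 > v) then true
    else goB ((insTop v top).take 3) rest

def solution_alt (V : List Int) : Bool := goB [] V.reverse

-- ===== PRECONDITION & SPEC =====
def Spec_solution (V : List Int) (out : Bool) : Prop := out = solution_alt V
instance (V : List Int) (out : Bool) : Decidable (Spec_solution V out) := by unfold Spec_solution; infer_instance

-- ===== CLAIM (what is proved, stated in full; the proofs are below) =====
def Claim_equal_solution : Prop := ∀ (V : List Int), Dom_solution V → Spec_solution V (solution V)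

-- ===== LEMMAS AND PROOFS =====

-- number of elements of s strictly greater than v (as an Int)
def cnt (v : Int) (s : List Int) : Int := (s.countP (fun x => decide (v < x)) : Nat)

-- middle spec: some element has at least three larger elements after it
def specB : List Int → Bool
  | [] => false
  | v :: rest => decide (3 ≤ cnt v rest) || specB rest

-- insertion sort, descending
def isd : List Int → List Int
  | [] => []
  | v :: s => insTop v (isd s)

-- right-to-left traversal spec: s = elements already passed (the true suffix)
def revSpec : List Int → List Int → Bool
  | _, [] => false
  | s, v :: rest => decide (3 ≤ cnt v s) || revSpec (v :: s) rest

theorem cnt_nonneg (v : Int) (s : List Int) : 0 ≤ cnt v s := by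
  simp [cnt]

theorem cnt_cons (v x : Int) (s : List Int) :
    cnt v (x :: s) = cnt v s + (if v < x then 1 else 0) := by
  by_cases h : v < x
  · simp [cnt, h]
  · simp [cnt, h]

-- A-side: the inner loop counts to three with early exit
theorem innerA_eq (vi : Int) (s : List Int) :
    ∀ c : Int, 0 ≤ c → c ≤ 2 → innerA vi s c = decide (3 ≤ c + cnt vi s) := by
  induction s with
  | nil =>
    intro c h0 h2
    simp only [innerA, cnt, List.countP_nil]
    rw [eq_comm, decide_eq_false_iff_not]
    omega
  | cons x rest ih =>
    intro c h0 h2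
    rw [cnt_cons]
    simp only [innerA, gt_iff_lt]
    by_cases hx : vi < x
    · simp only [if_pos hx]
      by_cases h3 : c + 1 = 3
      · rw [if_pos h3, eq_comm, decide_eq_true_iff]
        have := cnt_nonneg vi rest
        omega
      · rw [if_neg h3, ih (c + 1) (by omega) (by omega), decide_eq_decide]
        omega
    · simp only [if_neg hx]
      have h3 : ¬ c = 3 := by omega
      rw [if_neg h3, ih c h0 h2, decide_eq_decide]
      omega

theorem outerA_eq (V : List Int) : outerA V = specB V := by
  induction V with
  | nil => rfl
  | cons v rest ih =>
    simp only [outerA, specB]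
    rw [innerA_eq v (v :: rest) 0 (by omega) (by omega), cnt_cons]
    have : ¬ v < v := by omega
    rw [if_neg this, ← ih]
    cases h : decide (3 ≤ 0 + (cnt v rest + 0)) <;>
      cases h2 : decide (3 ≤ cnt v rest) <;> simp_all

-- B-side basic facts about insTop / isd
theorem insTop_perm (v : Int) (l : List Int) : (insTop v l).Perm (v :: l) := by
  induction l with
  | nil => simp [insTop]
  | cons x r ih =>
    simp only [insTop]
    split_ifs
    · exact (ih.cons x).trans (List.Perm.swap v x r)
    · exact List.Perm.refl _

theorem isd_perm (s : List Int) : (isd s).Perm s := by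
  induction s with
  | nil => simp [isd]
  | cons v r ih => exact (insTop_perm v (isd r)).trans (ih.cons v)

theorem cnt_isd (v : Int) (s : List Int) : cnt v (isd s) = cnt v s := by
  simp [cnt, (isd_perm s).countP_eq]

theorem insTop_pairwise (v : Int) (l : List Int) (h : l.Pairwise (· ≥ ·)) :
    (insTop v l).Pairwise (· ≥ ·) := by
  induction l with
  | nil => simp [insTop]
  | cons x r ih =>
    rw [List.pairwise_cons] at h
    simp only [insTop]
    split_ifs with hx
    · rw [List.pairwise_cons]
      refine ⟨fun y hy => ?_, ih h.2⟩
      rcases List.mem_cons.mp ((insTop_perm v r).mem_iff.mp hy) with rfl | hy'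
      · exact hx
      · exact h.1 y hy'
    · rw [List.pairwise_cons]
      refine ⟨fun y hy => ?_, List.pairwise_cons.mpr h⟩
      rcases List.mem_cons.mp hy with rfl | hy'
      · omega
      · have := h.1 y hy'
        omega

theorem isd_pairwise (s : List Int) : (isd s).Pairwise (· ≥ ·) := by
  induction s with
  | nil => simp [isd]
  | cons v r ih => exact insTop_pairwise v (isd r) ih

-- on a descending list, k < (count of elements > v) iff the k-th element is > v
theorem cnt_sorted (d : List Int) (hd : d.Pairwise (· ≥ ·)) (v : Int) (k : Nat) :
    ((k : Int) < cnt v d) ↔ (∃ w, d[k]? = some w ∧ v < w) := by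
  induction d generalizing k with
  | nil => simp [cnt]
  | cons x rest ih =>
    rw [List.pairwise_cons] at hd
    by_cases hv : v < x
    · rw [cnt_cons, if_pos hv]
      cases k with
      | zero =>
        simp only [List.getElem?_cons_zero]
        have := cnt_nonneg v rest
        constructor
        · intro _; exact ⟨x, rfl, hv⟩
        · intro _; omega
      | succ m =>
        simp only [List.getElem?_cons_succ]
        rw [← ih hd.2 m]
        push_cast
        omega
    · have hzero : cnt v (x :: rest) = 0 := by
        simp only [cnt]
        rw [List.countP_eq_zero.mpr]
        · rfl
        · intro a ha
          rcases ha with _ | ha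
          · simpa using hv
          · have := hd.1 a (by assumption)
            simp only [decide_eq_true_eq]
            omega
      rw [hzero]
      constructor
      · intro h; omega
      · rintro ⟨w, hw, hvw⟩
        have hmem : w ∈ x :: rest := List.mem_of_getElem? hw
        rcases hmem with _ | hmem
        · omega
        · have := hd.1 w (by assumption)
          omega

-- B's loop condition on the kept top-3 equals the counting test on the full suffix
theorem condB (s : List Int) (v : Int) :
    (((isd s).take 3).length == 3 && decide (PySem.List.pyGetD ((isd s).take 3) 2 0 > v))
      = decide (3 ≤ cnt v s) := by
  set d := isd s with hd
  by_cases hlen : 3 ≤ d.length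
  · have hl : ((d.take 3).length == 3) = true := by
      simp [List.length_take]; omega
    have h2 : (2 : Nat) < (d.take 3).length := by
      simp [List.length_take]; omega
    have h2d : (2 : Nat) < d.length := by omega
    have hget : PySem.List.pyGetD (d.take 3) 2 0 = d[2] := by
      rw [show (2 : Int) = ((2 : Nat) : Int) from rfl, PySem.List.pyGetD_natCast,
        List.getD_eq_getElem _ _ h2]
      simp [List.getElem_take]
    rw [hl, Bool.true_and, hget]
    have := cnt_sorted d (isd_pairwise s) v 2
    rw [cnt_isd] at this
    have hsome : d[2]? = some d[2] := List.getElem?_eq_getElem h2d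
    cases hv : decide (d[2] > v)
    · rw [eq_comm, decide_eq_false_iff_not]
      intro h
      have : ∃ w, d[2]? = some w ∧ v < w := this.mp (by omega)
      rcases this with ⟨w, hw, hvw⟩
      rw [hsome] at hw
      simp only [Option.some_inj] at hw
      subst hw
      simp only [decide_eq_false_iff_not] at hv
      omega
    · rw [eq_comm, decide_eq_true_iff]
      simp only [decide_eq_true_eq] at hv
      have : (2 : Int) < cnt v s := this.mpr ⟨d[2], hsome, hv⟩
      omega
  · have hl : ((d.take 3).length == 3) = false := by
      simp [List.length_take]; omega
    rw [hl, Bool.false_and, eq_comm, decide_eq_false_iff_not]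
    have h1 : s.countP (fun x => decide (v < x)) ≤ s.length := List.countP_le_length
    have h2 : d.length = s.length := (isd_perm s).length_eq
    simp only [cnt]
    omega

theorem take_cons_take (x : Int) (r : List Int) (m : Nat) :
    (x :: r.take m).take m = (x :: r).take m := by
  cases m with
  | zero => simp
  | succ p =>
    simp only [List.take_succ_cons, List.take_take]
    rw [Nat.min_eq_left (Nat.le_succ p)]

theorem take_insTop (v : Int) (l : List Int) (k : Nat) :
    (insTop v l).take k = (insTop v (l.take k)).take k := by
  induction l generalizing k with
  | nil => simp
  | cons x r ih =>
    simp only [insTop]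
    split_ifs with hx
    · cases k with
      | zero => simp
      | succ m =>
        simp only [List.take_succ_cons, insTop, if_pos hx]
        rw [ih m]
    · cases k with
      | zero => rfl
      | succ m =>
        simp only [List.take_succ_cons, insTop, if_neg hx]
        rw [take_cons_take]

theorem goB_inv (l : List Int) : ∀ s : List Int, goB ((isd s).take 3) l = revSpec s l := by
  induction l with
  | nil => intro s; rfl
  | cons v rest ih =>
    intro s
    simp only [goB, revSpec]
    rw [condB s v]
    cases h : decide (3 ≤ cnt v s)
    · simp only [Bool.false_or, if_neg Bool.false_ne_true]
      rw [← take_insTop]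
      exact ih (v :: s)
    · simp

theorem revSpec_append (l : List Int) (v : Int) :
    ∀ s, revSpec s (l ++ [v]) = (revSpec s l || decide (3 ≤ cnt v (l.reverse ++ s))) := by
  induction l with
  | nil => intro s; simp [revSpec]
  | cons x l' ih =>
    intro s
    simp only [List.cons_append, revSpec, ih (x :: s), List.reverse_cons, List.append_assoc,
      List.nil_append, Bool.or_assoc]

theorem revSpec_reverse (V : List Int) : revSpec [] V.reverse = specB V := by
  induction V with
  | nil => rfl
  | cons v rest ih =>
    rw [List.reverse_cons, revSpec_append, ih]
    simp only [List.reverse_reverse, List.append_nil, specB]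
    exact Bool.or_comm _ _

-- ===== VERDICT (by name: the statement is the Claim_ definition above) =====
theorem solution_spec : Claim_equal_solution := by
  intro V _
  show solution V = solution_alt V
  have hB : solution_alt V = revSpec [] V.reverse := by
    have := goB_inv V.reverse []
    simpa [isd, solution_alt] using this
  rw [hB, revSpec_reverse]
  exact outerA_eq V
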